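-- pv_equiv track=rewrite | github.com/matcianfa/playground-X1rXTswJ | python-project/Defis/Euler_872_Correction.py | resoudre_euler_872
-- ===== SOURCE A (Python) =====
-- def resoudre_euler_872(n,k):
--     """
--     On remarque que se déplacer dans l'arbre revient à utiliser l'écriture binaire de n-k
--     """
--     reponse = n
--     bin_n_k = bin(n-k)[2::]
--     bin_n_k = bin_n_k[::-1] # On renverse
--     puiss_2 =1
--     valeur_noeud = n
--     for bit in bin_n_k :
--         if bit == "1":
--             valeur_noeud -= puiss_2
--             reponse += valeur_noeud
--         puiss_2 *=2
--     return reponse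
-- ===== SOURCE B (Python) =====
-- def resoudre_euler_872(n, k):
--     # Walk only the set bits of |n-k| (A's bin(x)[2:] drops the sign, so it
--     # effectively processes |n-k|): clear the lowest set bit with t &= t - 1;
--     # the remaining high part t is exactly the node value minus (n - m).
--     m = t = abs(n - k)
--     reponse = n
--     while t:
--         t &= t - 1
--         reponse += n - m + t
--     return reponse
-- ===== Notes on version B (the rewrite author's own statement) =====
-- stated objective: alternative
-- what changed: Replaces the bin()-string reversal and per-bit-position loop (with a running power of two and node-value accumulator) by integer bit manipulation that iterates only over the set bits of |n-k|, clearing the lowest set bit with t &= t-1 and reading the node value directly off the remaining high part.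
import Mathlib
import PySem

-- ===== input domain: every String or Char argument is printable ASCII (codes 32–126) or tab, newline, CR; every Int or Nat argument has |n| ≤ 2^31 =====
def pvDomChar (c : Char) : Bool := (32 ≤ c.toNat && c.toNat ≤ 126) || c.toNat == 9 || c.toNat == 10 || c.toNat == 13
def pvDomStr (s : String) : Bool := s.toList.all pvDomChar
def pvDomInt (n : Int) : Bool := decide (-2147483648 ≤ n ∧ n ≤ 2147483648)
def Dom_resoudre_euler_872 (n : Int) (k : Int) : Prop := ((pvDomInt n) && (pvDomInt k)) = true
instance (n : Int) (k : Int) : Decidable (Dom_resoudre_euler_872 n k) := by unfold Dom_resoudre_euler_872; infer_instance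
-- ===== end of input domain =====

-- B replaces A's bin()-string loop over every bit position by clearing one set
-- bit of |n-k| at a time with t &&& (t-1) (objective: alternative algorithm).

-- ===== PORT A =====

-- binary digits of m, most significant first (empty for 0; bin() handles 0 separately)
def pvNatBin : Nat → List Char
  | 0 => []
  | (t+1) => pvNatBin ((t+1)/2) ++ [if (t+1) % 2 = 1 then '1' else '0']
decreasing_by exact Nat.div_lt_self (Nat.succ_pos t) (by norm_num)

-- Python bin(x) as a char list: optional '-', then "0b", then the digits of |x| (exact for every int)
def pvPyBin (x : Int) : List Char :=
  (if x < 0 then ['-'] else []) ++ ['0','b'] ++ (if x.natAbs = 0 then ['0'] else pvNatBin x.natAbs)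

-- A's for-loop over the reversed bit string, state (reponse, puiss_2, valeur_noeud)
def pvALoop : List Char → Int → Int → Int → Int
  | [], reponse, _, _ => reponse
  | c :: cs, reponse, puiss2, val =>
      if c = '1' then pvALoop cs (reponse + (val - puiss2)) (2*puiss2) (val - puiss2)
      else pvALoop cs reponse (2*puiss2) val

def resoudre_euler_872 (n : Int) (k : Int) : Int :=
  -- bin(n-k)[2::] is List.drop 2 (the string always has ≥ 2 chars) and [::-1] is reverse: exact here
  pvALoop ((pvPyBin (n - k)).drop 2).reverse n 1 n

-- ===== PORT B =====

-- B's while-loop: clear the lowest set bit of t, add n - m + t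
def pvBLoop (n m : Int) (t : Nat) (reponse : Int) : Int :=
  if h : t = 0 then reponse
  else
    let t' := t &&& (t - 1)
    pvBLoop n m t' (reponse + (n - m + (t' : Int)))
termination_by t
decreasing_by exact lt_of_le_of_lt Nat.and_le_right (Nat.sub_lt (Nat.pos_of_ne_zero h) one_pos)

def resoudre_euler_872_alt (n : Int) (k : Int) : Int :=
  let m : Nat := (n - k).natAbs   -- m = t = abs(n - k)
  pvBLoop n (m : Int) m n

-- ===== PRECONDITION & SPEC =====
def Spec_resoudre_euler_872 (n : Int) (k : Int) (out : Int) : Prop := out = resoudre_euler_872_alt n k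
instance (n : Int) (k : Int) (out : Int) : Decidable (Spec_resoudre_euler_872 n k out) := by unfold Spec_resoudre_euler_872; infer_instance

-- ===== CLAIM (what is proved, stated in full; the proofs are below) =====
def Claim_equal_resoudre_euler_872 : Prop := ∀ (n : Int) (k : Int), Dom_resoudre_euler_872 n k → Spec_resoudre_euler_872 n k (resoudre_euler_872 n k)

-- ===== LEMMAS AND PROOFS =====

-- common reference loop: process the bits of t least-significant first, p the current power of two
def pvSpecLoop : Nat → Int → Int → Int → Int
  | 0, reponse, _, _ => reponse
  | (t+1), reponse, p, val =>
      if (t+1) % 2 = 1 then pvSpecLoop ((t+1)/2) (reponse + (val - p)) (2*p) (val - p)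
      else pvSpecLoop ((t+1)/2) reponse (2*p) val
decreasing_by all_goals exact Nat.div_lt_self (Nat.succ_pos t) (by norm_num)

theorem pvSpecLoop_ne_zero (t : Nat) (h : t ≠ 0) (reponse p val : Int) :
    pvSpecLoop t reponse p val =
      if t % 2 = 1 then pvSpecLoop (t/2) (reponse + (val - p)) (2*p) (val - p)
      else pvSpecLoop (t/2) reponse (2*p) val := by
  obtain ⟨s, rfl⟩ : ∃ s, t = s + 1 := ⟨t - 1, by omega⟩
  simp [pvSpecLoop]

-- ---- A side ----

theorem pvALoop_no1 (l : List Char) (h : ∀ c ∈ l, c ≠ '1') :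
    ∀ (reponse p val : Int), pvALoop l reponse p val = reponse := by
  induction l with
  | nil => intro reponse p val; rfl
  | cons c cs ih =>
      intro reponse p val
      have hc : c ≠ '1' := h c (List.mem_cons_self ..)
      simp only [pvALoop, if_neg hc]
      exact ih (fun d hd => h d (List.mem_cons_of_mem _ hd)) _ _ _

theorem pvNatBin_ne_zero (m : Nat) (h : m ≠ 0) :
    pvNatBin m = pvNatBin (m/2) ++ [if m % 2 = 1 then '1' else '0'] := by
  obtain ⟨s, rfl⟩ : ∃ s, m = s + 1 := ⟨m - 1, by omega⟩
  simp [pvNatBin]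

theorem pvALoop_natBin (m : Nat) :
    ∀ (ext : List Char), (∀ c ∈ ext, c ≠ '1') →
    ∀ (reponse p val : Int),
      pvALoop ((pvNatBin m).reverse ++ ext) reponse p val = pvSpecLoop m reponse p val := by
  induction m using Nat.strong_induction_on with
  | _ m ih =>
      intro ext hext reponse p val
      by_cases hm : m = 0
      · subst hm
        simpa [pvNatBin, pvSpecLoop] using pvALoop_no1 ext hext reponse p val
      · rw [pvNatBin_ne_zero m hm, pvSpecLoop_ne_zero m hm]
        have hlt : m / 2 < m := Nat.div_lt_self (Nat.pos_of_ne_zero hm) (by norm_num)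
        by_cases hpar : m % 2 = 1
        · simp only [hpar, if_pos rfl, List.reverse_append, List.reverse_singleton,
            List.singleton_append, List.cons_append, pvALoop, if_pos rfl]
          simpa using ih (m/2) hlt ext hext (reponse + (val - p)) (2*p) (val - p)
        · have h0 : ('0' : Char) ≠ '1' := by decide
          simp only [hpar, List.reverse_append, List.reverse_singleton,
            List.cons_append, pvALoop, if_neg, h0]
          simpa using ih (m/2) hlt ext hext reponse (2*p) val

-- ---- bit lemmas for B ----

theorem pvLand_pred_odd (t : Nat) (h : t % 2 = 1) : t &&& (t - 1) = t - 1 := by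
  apply Nat.eq_of_testBit_eq
  intro i
  rw [Nat.testBit_and]
  cases i with
  | zero =>
      have h1 : (t - 1) % 2 = 0 := by omega
      simp [Nat.testBit_zero, h1]
  | succ i =>
      have h2 : (t - 1) / 2 = t / 2 := by omega
      rw [Nat.testBit_succ, Nat.testBit_succ, h2, Bool.and_self]

theorem pvLand_pred_even (t : Nat) (h0 : t ≠ 0) (h : t % 2 = 0) :
    t &&& (t - 1) = 2 * ((t/2) &&& (t/2 - 1)) := by
  apply Nat.eq_of_testBit_eq
  intro i
  rw [Nat.testBit_and]
  cases i with
  | zero =>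
      have h1 : (2 * (t / 2 &&& (t / 2 - 1))) % 2 = 0 := by omega
      simp [Nat.testBit_zero, h, h1]
  | succ i =>
      have h2 : (t - 1) / 2 = t / 2 - 1 := by omega
      have h3 : (2 * (t / 2 &&& (t / 2 - 1))) / 2 = (t/2) &&& (t/2 - 1) := by omega
      rw [Nat.testBit_succ, Nat.testBit_succ, Nat.testBit_succ, h2, h3, Nat.testBit_and]

theorem pvLand_pred_lt (t : Nat) (h : t ≠ 0) : t &&& (t - 1) < t :=
  lt_of_le_of_lt Nat.and_le_right (Nat.sub_lt (Nat.pos_of_ne_zero h) one_pos)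

-- ---- B side ----

-- B's loop with the node value and a power-of-two weight made explicit
def pvGB (p : Int) (t : Nat) (reponse val : Int) : Int :=
  if h : t = 0 then reponse
  else
    let t' := t &&& (t - 1)
    pvGB p t' (reponse + (val - p * ((t : Int) - (t' : Int)))) (val - p * ((t : Int) - (t' : Int)))
termination_by t
decreasing_by exact pvLand_pred_lt t h

theorem pvBLoop_eq_gB (n m : Int) (t : Nat) :
    ∀ (reponse : Int), pvBLoop n m t reponse = pvGB 1 t reponse (n - m + (t : Int)) := by
  induction t using Nat.strong_induction_on with
  | _ t ih =>
      intro reponse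
      by_cases ht : t = 0
      · subst ht; simp [pvBLoop, pvGB]
      · rw [pvBLoop, pvGB]
        simp only [dif_neg ht]
        have harg : n - m + (t : Int) - 1 * ((t : Int) - ((t &&& (t - 1) : Nat) : Int))
            = n - m + ((t &&& (t - 1) : Nat) : Int) := by ring
        rw [ih (t &&& (t - 1)) (pvLand_pred_lt t ht), harg]

theorem pvGB_double (u : Nat) :
    ∀ (p reponse val : Int), pvGB p (2*u) reponse val = pvGB (2*p) u reponse val := by
  induction u using Nat.strong_induction_on with
  | _ u ih =>
      intro p reponse val
      by_cases hu : u = 0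
      · subst hu; simp [pvGB]
      · have h2u : 2*u ≠ 0 := by omega
        conv_lhs => rw [pvGB]
        conv_rhs => rw [pvGB]
        simp only [dif_neg hu, dif_neg h2u]
        have he : (2*u) &&& (2*u - 1) = 2 * (u &&& (u - 1)) := by
          have h := pvLand_pred_even (2*u) h2u (by omega)
          have hd : (2*u)/2 = u := by omega
          rw [hd] at h
          exact h
        have hle : u &&& (u - 1) ≤ u := le_trans Nat.and_le_right (by omega)
        have hcast : ((2*u : Nat) : Int) - (((2*u) &&& (2*u - 1) : Nat) : Int)
            = 2 * ((u : Int) - ((u &&& (u - 1) : Nat) : Int)) := by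
          rw [he]; push_cast; ring
        rw [he] at hcast ⊢
        rw [hcast]
        rw [ih (u &&& (u - 1)) (pvLand_pred_lt u hu)]
        ring_nf

theorem pvGB_eq_spec (t : Nat) :
    ∀ (p reponse val : Int), pvGB p t reponse val = pvSpecLoop t reponse p val := by
  induction t using Nat.strong_induction_on with
  | _ t ih =>
      intro p reponse val
      by_cases ht : t = 0
      · subst ht; simp [pvGB, pvSpecLoop]
      · rw [pvSpecLoop_ne_zero t ht]
        have hlt : t / 2 < t := Nat.div_lt_self (Nat.pos_of_ne_zero ht) (by norm_num)
        by_cases hpar : t % 2 = 1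
        · -- lowest bit set: one pvGB step subtracts exactly p
          rw [pvGB]
          simp only [dif_neg ht]
          rw [pvLand_pred_odd t hpar]
          have h1 : ((t : Int) - ((t - 1 : Nat) : Int)) = 1 := by
            have : 1 ≤ t := by omega
            push_cast [Nat.cast_sub this]; ring
          rw [h1]
          have h2 : t - 1 = 2 * (t / 2) := by omega
          rw [h2, pvGB_double]
          rw [ih (t/2) hlt, if_pos hpar]
          ring_nf
        · -- lowest bit clear: halve via pvGB_double
          have h2 : t = 2 * (t / 2) := by omega
          rw [if_neg hpar]
          conv_lhs => rw [h2]
          rw [pvGB_double, ih (t/2) hlt]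

-- ---- final assembly ----

theorem resoudre_euler_872_eq_spec (n k : Int) :
    resoudre_euler_872 n k = pvSpecLoop (n - k).natAbs n 1 n := by
  unfold resoudre_euler_872 pvPyBin
  set x := n - k with hx
  by_cases hneg : x < 0
  · have hm : x.natAbs ≠ 0 := by
      simp only [ne_eq, Int.natAbs_eq_zero]; omega
    simp only [if_pos hneg, if_neg hm, List.cons_append, List.nil_append,
      List.drop_succ_cons, List.drop_zero, List.reverse_cons]
    exact pvALoop_natBin x.natAbs ['b'] (by simp) n 1 n
  · by_cases hm : x.natAbs = 0
    · simp only [if_neg hneg, hm, List.nil_append, List.cons_append,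
        List.drop_succ_cons, List.drop_zero]
      have h0 : pvNatBin 0 = [] := by simp [pvNatBin]
      simpa [h0] using pvALoop_natBin 0 ['0'] (by simp) n 1 n
    · simp only [if_neg hneg, if_neg hm, List.nil_append, List.cons_append,
        List.drop_succ_cons, List.drop_zero]
      simpa using pvALoop_natBin x.natAbs [] (by simp) n 1 n

theorem resoudre_euler_872_alt_eq_spec (n k : Int) :
    resoudre_euler_872_alt n k = pvSpecLoop (n - k).natAbs n 1 n := by
  unfold resoudre_euler_872_alt
  rw [pvBLoop_eq_gB]
  have h : n - ((n - k).natAbs : Int) + ((n - k).natAbs : Int) = n := by ring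
  rw [h, pvGB_eq_spec]

-- ===== VERDICT (by name: the statement is the Claim_ definition above) =====
theorem resoudre_euler_872_spec : Claim_equal_resoudre_euler_872 := by
  intro n k _
  unfold Spec_resoudre_euler_872
  rw [resoudre_euler_872_eq_spec, resoudre_euler_872_alt_eq_spec]
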